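-- pv_equiv track=rewrite | github.com/prosoftservices54/testDigiCard | db/db_requests_customer.py | find_lvl
-- ===== SOURCE A (Python) =====
-- def find_lvl(points):
--     """
--     Find the level of a customer based on their points.
--     :param points:
--     :return:
--     """
--     niveau = 0
--     for i in range(1,11):
--         points -= i
--         if points >= 0:
--             niveau += 1
--         else :
--             return niveau
--     return niveau + points//10
-- ===== SOURCE B (Python) =====
-- def find_lvl(points):
--     if points >= 55:
--         return 10 + (points - 55) // 10
--     # binary search for the largest k in 0..10 with k*(k+1)//2 <= points
--     lo, hi = 0, 10
--     while lo < hi: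
--         mid = (lo + hi + 1) // 2
--         if mid * (mid + 1) // 2 <= points:
--             lo = mid
--         else:
--             hi = mid - 1
--     return lo
-- ===== Notes on version B (the rewrite author's own statement) =====
-- stated objective: alternative
-- what changed: Replaces A's sequential subtraction loop (points -= i with an early return) by a closed-form branch for points >= 55 and a binary search for the largest level k with k*(k+1)//2 <= points below it.
import Mathlib
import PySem

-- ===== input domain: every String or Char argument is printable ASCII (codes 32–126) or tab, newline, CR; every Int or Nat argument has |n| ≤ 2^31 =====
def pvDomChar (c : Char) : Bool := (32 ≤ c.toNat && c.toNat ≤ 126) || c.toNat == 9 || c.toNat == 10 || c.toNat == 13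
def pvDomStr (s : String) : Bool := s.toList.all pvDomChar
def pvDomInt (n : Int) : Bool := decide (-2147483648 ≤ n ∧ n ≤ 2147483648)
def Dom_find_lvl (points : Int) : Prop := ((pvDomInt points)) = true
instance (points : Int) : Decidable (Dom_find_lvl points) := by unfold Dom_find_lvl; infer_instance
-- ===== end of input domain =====

-- B replaces A's step-by-step point subtraction with a closed form at/above 55 points and a
-- binary search for the level below it (objective: alternative structure, same cost at this scale).

-- ===== PORT A =====
-- early return is modelled by Sum: .inl = returned inside the loop, .inr = loop finished
def findLvlLoop : List Int → Int → Int → Int ⊕ (Int × Int)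
  | [], points, niveau => .inr (niveau, points)
  | i :: rest, points, niveau =>
    if points - i ≥ 0 then findLvlLoop rest (points - i) (niveau + 1)
    else .inl niveau

def find_lvl (points : Int) : Int :=
  match findLvlLoop (PySem.List.pyRange 1 11 1) points 0 with
  | .inl n => n
  | .inr (n, p) => n + PySem.Int.floordiv p 10

-- ===== PORT B =====
-- fuel 11 (> hi - lo = 10) only makes the while-loop total; it is never exhausted
def findLvlBsearch : Nat → Int → Int → Int → Int
  | 0, _, lo, _ => lo
  | fuel + 1, points, lo, hi =>
    if lo < hi then
      if PySem.Int.floordiv (PySem.Int.floordiv (lo + hi + 1) 2 * (PySem.Int.floordiv (lo + hi + 1) 2 + 1)) 2 ≤ points then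
        findLvlBsearch fuel points (PySem.Int.floordiv (lo + hi + 1) 2) hi
      else
        findLvlBsearch fuel points lo (PySem.Int.floordiv (lo + hi + 1) 2 - 1)
    else lo

def find_lvl_alt (points : Int) : Int :=
  if points ≥ 55 then 10 + PySem.Int.floordiv (points - 55) 10
  else findLvlBsearch 11 points 0 10

-- ===== PRECONDITION & SPEC =====
def Spec_find_lvl (points : Int) (out : Int) : Prop := out = find_lvl_alt points
instance (points : Int) (out : Int) : Decidable (Spec_find_lvl points out) := by unfold Spec_find_lvl; infer_instance

-- ===== CLAIM (what is proved, stated in full; the proofs are below) =====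
def Claim_equal_find_lvl : Prop := ∀ (points : Int), Dom_find_lvl points → Spec_find_lvl points (find_lvl points)

-- ===== LEMMAS AND PROOFS =====
theorem pyRange_1_11 : PySem.List.pyRange 1 11 1 = [1,2,3,4,5,6,7,8,9,10] := by
  rw [PySem.List.pyRange_one]
  rfl

theorem hfd2 (a : Int) : PySem.Int.floordiv a 2 = a / 2 :=
  PySem.Int.floordiv_eq_ediv_of_pos (by norm_num)

theorem bsearch_step (f : Nat) (p lo hi : Int) (h : lo < hi) :
    findLvlBsearch (f + 1) p lo hi =
      if PySem.Int.floordiv (PySem.Int.floordiv (lo + hi + 1) 2 * (PySem.Int.floordiv (lo + hi + 1) 2 + 1)) 2 ≤ p then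
        findLvlBsearch f p (PySem.Int.floordiv (lo + hi + 1) 2) hi
      else
        findLvlBsearch f p lo (PySem.Int.floordiv (lo + hi + 1) 2 - 1) := by
  rw [findLvlBsearch, if_pos h]

theorem bsearch_done (f : Nat) (p lo hi : Int) (h : ¬ lo < hi) :
    findLvlBsearch (f + 1) p lo hi = lo := by
  rw [findLvlBsearch, if_neg h]

theorem regionB_0 (points : Int) (h2 : points < 1) :
    findLvlBsearch 11 points 0 10 = 0 := by
  rw [show (11:Nat) = 10+1 from rfl, bsearch_step 10 points 0 10 (by norm_num)]
  norm_num [hfd2]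
  rw [if_neg (by omega : ¬ (15:Int) ≤ points)]
  rw [show (10:Nat) = 9+1 from rfl, bsearch_step 9 points 0 4 (by norm_num)]
  norm_num [hfd2]
  rw [if_neg (by omega : ¬ (3:Int) ≤ points)]
  rw [show (9:Nat) = 8+1 from rfl, bsearch_step 8 points 0 1 (by norm_num)]
  norm_num [hfd2]
  rw [if_neg (by omega : ¬ (1:Int) ≤ points)]
  rw [show (8:Nat) = 7+1 from rfl, bsearch_done 7 points 0 0 (by norm_num)]

theorem regionA_0 (points : Int) (h2 : points < 1) :
    find_lvl points = 0 := by
  unfold find_lvl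
  rw [pyRange_1_11]
  simp only [findLvlLoop]
  rw [if_neg (by omega)]
  try norm_num

theorem regionB_1 (points : Int) (h1 : (1:Int) ≤ points) (h2 : points < 3) :
    findLvlBsearch 11 points 0 10 = 1 := by
  rw [show (11:Nat) = 10+1 from rfl, bsearch_step 10 points 0 10 (by norm_num)]
  norm_num [hfd2]
  rw [if_neg (by omega : ¬ (15:Int) ≤ points)]
  rw [show (10:Nat) = 9+1 from rfl, bsearch_step 9 points 0 4 (by norm_num)]
  norm_num [hfd2]
  rw [if_neg (by omega : ¬ (3:Int) ≤ points)]
  rw [show (9:Nat) = 8+1 from rfl, bsearch_step 8 points 0 1 (by norm_num)]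
  norm_num [hfd2]
  rw [if_pos (by omega : (1:Int) ≤ points)]
  rw [show (8:Nat) = 7+1 from rfl, bsearch_done 7 points 1 1 (by norm_num)]

theorem regionA_1 (points : Int) (h1 : (1:Int) ≤ points) (h2 : points < 3) :
    find_lvl points = 1 := by
  unfold find_lvl
  rw [pyRange_1_11]
  simp only [findLvlLoop]
  rw [if_pos (by omega), if_neg (by omega)]
  try norm_num

theorem regionB_2 (points : Int) (h1 : (3:Int) ≤ points) (h2 : points < 6) :
    findLvlBsearch 11 points 0 10 = 2 := by
  rw [show (11:Nat) = 10+1 from rfl, bsearch_step 10 points 0 10 (by norm_num)]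
  norm_num [hfd2]
  rw [if_neg (by omega : ¬ (15:Int) ≤ points)]
  rw [show (10:Nat) = 9+1 from rfl, bsearch_step 9 points 0 4 (by norm_num)]
  norm_num [hfd2]
  rw [if_pos (by omega : (3:Int) ≤ points)]
  rw [show (9:Nat) = 8+1 from rfl, bsearch_step 8 points 2 4 (by norm_num)]
  norm_num [hfd2]
  rw [if_neg (by omega : ¬ (6:Int) ≤ points)]
  rw [show (8:Nat) = 7+1 from rfl, bsearch_done 7 points 2 2 (by norm_num)]

theorem regionA_2 (points : Int) (h1 : (3:Int) ≤ points) (h2 : points < 6) :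
    find_lvl points = 2 := by
  unfold find_lvl
  rw [pyRange_1_11]
  simp only [findLvlLoop]
  rw [if_pos (by omega), if_pos (by omega), if_neg (by omega)]
  try norm_num

theorem regionB_3 (points : Int) (h1 : (6:Int) ≤ points) (h2 : points < 10) :
    findLvlBsearch 11 points 0 10 = 3 := by
  rw [show (11:Nat) = 10+1 from rfl, bsearch_step 10 points 0 10 (by norm_num)]
  norm_num [hfd2]
  rw [if_neg (by omega : ¬ (15:Int) ≤ points)]
  rw [show (10:Nat) = 9+1 from rfl, bsearch_step 9 points 0 4 (by norm_num)]
  norm_num [hfd2]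
  rw [if_pos (by omega : (3:Int) ≤ points)]
  rw [show (9:Nat) = 8+1 from rfl, bsearch_step 8 points 2 4 (by norm_num)]
  norm_num [hfd2]
  rw [if_pos (by omega : (6:Int) ≤ points)]
  rw [show (8:Nat) = 7+1 from rfl, bsearch_step 7 points 3 4 (by norm_num)]
  norm_num [hfd2]
  rw [if_neg (by omega : ¬ (10:Int) ≤ points)]
  rw [show (7:Nat) = 6+1 from rfl, bsearch_done 6 points 3 3 (by norm_num)]

theorem regionA_3 (points : Int) (h1 : (6:Int) ≤ points) (h2 : points < 10) :
    find_lvl points = 3 := by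
  unfold find_lvl
  rw [pyRange_1_11]
  simp only [findLvlLoop]
  rw [if_pos (by omega), if_pos (by omega), if_pos (by omega), if_neg (by omega)]
  try norm_num

theorem regionB_4 (points : Int) (h1 : (10:Int) ≤ points) (h2 : points < 15) :
    findLvlBsearch 11 points 0 10 = 4 := by
  rw [show (11:Nat) = 10+1 from rfl, bsearch_step 10 points 0 10 (by norm_num)]
  norm_num [hfd2]
  rw [if_neg (by omega : ¬ (15:Int) ≤ points)]
  rw [show (10:Nat) = 9+1 from rfl, bsearch_step 9 points 0 4 (by norm_num)]
  norm_num [hfd2]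
  rw [if_pos (by omega : (3:Int) ≤ points)]
  rw [show (9:Nat) = 8+1 from rfl, bsearch_step 8 points 2 4 (by norm_num)]
  norm_num [hfd2]
  rw [if_pos (by omega : (6:Int) ≤ points)]
  rw [show (8:Nat) = 7+1 from rfl, bsearch_step 7 points 3 4 (by norm_num)]
  norm_num [hfd2]
  rw [if_pos (by omega : (10:Int) ≤ points)]
  rw [show (7:Nat) = 6+1 from rfl, bsearch_done 6 points 4 4 (by norm_num)]

theorem regionA_4 (points : Int) (h1 : (10:Int) ≤ points) (h2 : points < 15) :
    find_lvl points = 4 := by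
  unfold find_lvl
  rw [pyRange_1_11]
  simp only [findLvlLoop]
  rw [if_pos (by omega), if_pos (by omega), if_pos (by omega), if_pos (by omega), if_neg (by omega)]
  try norm_num

theorem regionB_5 (points : Int) (h1 : (15:Int) ≤ points) (h2 : points < 21) :
    findLvlBsearch 11 points 0 10 = 5 := by
  rw [show (11:Nat) = 10+1 from rfl, bsearch_step 10 points 0 10 (by norm_num)]
  norm_num [hfd2]
  rw [if_pos (by omega : (15:Int) ≤ points)]
  rw [show (10:Nat) = 9+1 from rfl, bsearch_step 9 points 5 10 (by norm_num)]
  norm_num [hfd2]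
  rw [if_neg (by omega : ¬ (36:Int) ≤ points)]
  rw [show (9:Nat) = 8+1 from rfl, bsearch_step 8 points 5 7 (by norm_num)]
  norm_num [hfd2]
  rw [if_neg (by omega : ¬ (21:Int) ≤ points)]
  rw [show (8:Nat) = 7+1 from rfl, bsearch_done 7 points 5 5 (by norm_num)]

theorem regionA_5 (points : Int) (h1 : (15:Int) ≤ points) (h2 : points < 21) :
    find_lvl points = 5 := by
  unfold find_lvl
  rw [pyRange_1_11]
  simp only [findLvlLoop]
  rw [if_pos (by omega), if_pos (by omega), if_pos (by omega), if_pos (by omega), if_pos (by omega), if_neg (by omega)]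
  try norm_num

theorem regionB_6 (points : Int) (h1 : (21:Int) ≤ points) (h2 : points < 28) :
    findLvlBsearch 11 points 0 10 = 6 := by
  rw [show (11:Nat) = 10+1 from rfl, bsearch_step 10 points 0 10 (by norm_num)]
  norm_num [hfd2]
  rw [if_pos (by omega : (15:Int) ≤ points)]
  rw [show (10:Nat) = 9+1 from rfl, bsearch_step 9 points 5 10 (by norm_num)]
  norm_num [hfd2]
  rw [if_neg (by omega : ¬ (36:Int) ≤ points)]
  rw [show (9:Nat) = 8+1 from rfl, bsearch_step 8 points 5 7 (by norm_num)]
  norm_num [hfd2]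
  rw [if_pos (by omega : (21:Int) ≤ points)]
  rw [show (8:Nat) = 7+1 from rfl, bsearch_step 7 points 6 7 (by norm_num)]
  norm_num [hfd2]
  rw [if_neg (by omega : ¬ (28:Int) ≤ points)]
  rw [show (7:Nat) = 6+1 from rfl, bsearch_done 6 points 6 6 (by norm_num)]

theorem regionA_6 (points : Int) (h1 : (21:Int) ≤ points) (h2 : points < 28) :
    find_lvl points = 6 := by
  unfold find_lvl
  rw [pyRange_1_11]
  simp only [findLvlLoop]
  rw [if_pos (by omega), if_pos (by omega), if_pos (by omega), if_pos (by omega), if_pos (by omega), if_pos (by omega), if_neg (by omega)]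
  try norm_num

theorem regionB_7 (points : Int) (h1 : (28:Int) ≤ points) (h2 : points < 36) :
    findLvlBsearch 11 points 0 10 = 7 := by
  rw [show (11:Nat) = 10+1 from rfl, bsearch_step 10 points 0 10 (by norm_num)]
  norm_num [hfd2]
  rw [if_pos (by omega : (15:Int) ≤ points)]
  rw [show (10:Nat) = 9+1 from rfl, bsearch_step 9 points 5 10 (by norm_num)]
  norm_num [hfd2]
  rw [if_neg (by omega : ¬ (36:Int) ≤ points)]
  rw [show (9:Nat) = 8+1 from rfl, bsearch_step 8 points 5 7 (by norm_num)]
  norm_num [hfd2]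
  rw [if_pos (by omega : (21:Int) ≤ points)]
  rw [show (8:Nat) = 7+1 from rfl, bsearch_step 7 points 6 7 (by norm_num)]
  norm_num [hfd2]
  rw [if_pos (by omega : (28:Int) ≤ points)]
  rw [show (7:Nat) = 6+1 from rfl, bsearch_done 6 points 7 7 (by norm_num)]

theorem regionA_7 (points : Int) (h1 : (28:Int) ≤ points) (h2 : points < 36) :
    find_lvl points = 7 := by
  unfold find_lvl
  rw [pyRange_1_11]
  simp only [findLvlLoop]
  rw [if_pos (by omega), if_pos (by omega), if_pos (by omega), if_pos (by omega), if_pos (by omega), if_pos (by omega), if_pos (by omega), if_neg (by omega)]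
  try norm_num

theorem regionB_8 (points : Int) (h1 : (36:Int) ≤ points) (h2 : points < 45) :
    findLvlBsearch 11 points 0 10 = 8 := by
  rw [show (11:Nat) = 10+1 from rfl, bsearch_step 10 points 0 10 (by norm_num)]
  norm_num [hfd2]
  rw [if_pos (by omega : (15:Int) ≤ points)]
  rw [show (10:Nat) = 9+1 from rfl, bsearch_step 9 points 5 10 (by norm_num)]
  norm_num [hfd2]
  rw [if_pos (by omega : (36:Int) ≤ points)]
  rw [show (9:Nat) = 8+1 from rfl, bsearch_step 8 points 8 10 (by norm_num)]
  norm_num [hfd2]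
  rw [if_neg (by omega : ¬ (45:Int) ≤ points)]
  rw [show (8:Nat) = 7+1 from rfl, bsearch_done 7 points 8 8 (by norm_num)]

theorem regionA_8 (points : Int) (h1 : (36:Int) ≤ points) (h2 : points < 45) :
    find_lvl points = 8 := by
  unfold find_lvl
  rw [pyRange_1_11]
  simp only [findLvlLoop]
  rw [if_pos (by omega), if_pos (by omega), if_pos (by omega), if_pos (by omega), if_pos (by omega), if_pos (by omega), if_pos (by omega), if_pos (by omega), if_neg (by omega)]
  try norm_num

theorem regionB_9 (points : Int) (h1 : (45:Int) ≤ points) (h2 : points < 55) :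
    findLvlBsearch 11 points 0 10 = 9 := by
  rw [show (11:Nat) = 10+1 from rfl, bsearch_step 10 points 0 10 (by norm_num)]
  norm_num [hfd2]
  rw [if_pos (by omega : (15:Int) ≤ points)]
  rw [show (10:Nat) = 9+1 from rfl, bsearch_step 9 points 5 10 (by norm_num)]
  norm_num [hfd2]
  rw [if_pos (by omega : (36:Int) ≤ points)]
  rw [show (9:Nat) = 8+1 from rfl, bsearch_step 8 points 8 10 (by norm_num)]
  norm_num [hfd2]
  rw [if_pos (by omega : (45:Int) ≤ points)]
  rw [show (8:Nat) = 7+1 from rfl, bsearch_step 7 points 9 10 (by norm_num)]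
  norm_num [hfd2]
  rw [if_neg (by omega : ¬ (55:Int) ≤ points)]
  rw [show (7:Nat) = 6+1 from rfl, bsearch_done 6 points 9 9 (by norm_num)]

theorem regionA_9 (points : Int) (h1 : (45:Int) ≤ points) (h2 : points < 55) :
    find_lvl points = 9 := by
  unfold find_lvl
  rw [pyRange_1_11]
  simp only [findLvlLoop]
  rw [if_pos (by omega), if_pos (by omega), if_pos (by omega), if_pos (by omega), if_pos (by omega), if_pos (by omega), if_pos (by omega), if_pos (by omega), if_pos (by omega), if_neg (by omega)]
  try norm_num

-- ===== VERDICT (by name: the statement is the Claim_ definition above) =====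
theorem find_lvl_spec : Claim_equal_find_lvl := by
  intro points _
  unfold Spec_find_lvl
  by_cases h55 : (55:Int) ≤ points
  · unfold find_lvl find_lvl_alt
    rw [pyRange_1_11]
    simp only [findLvlLoop]
    rw [if_pos (by omega), if_pos (by omega), if_pos (by omega), if_pos (by omega), if_pos (by omega),
        if_pos (by omega), if_pos (by omega), if_pos (by omega), if_pos (by omega), if_pos (by omega),
        if_pos h55]
    have h : points - 1 - 2 - 3 - 4 - 5 - 6 - 7 - 8 - 9 - 10 = points - 55 := by ring
    rw [h]
    norm_num
  by_cases c0 : points < 1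
  · rw [regionA_0 points c0, find_lvl_alt, if_neg (by omega), regionB_0 points c0]
  by_cases c1 : points < 3
  · rw [regionA_1 points (by omega) c1, find_lvl_alt, if_neg (by omega), regionB_1 points (by omega) c1]
  by_cases c2 : points < 6
  · rw [regionA_2 points (by omega) c2, find_lvl_alt, if_neg (by omega), regionB_2 points (by omega) c2]
  by_cases c3 : points < 10
  · rw [regionA_3 points (by omega) c3, find_lvl_alt, if_neg (by omega), regionB_3 points (by omega) c3]
  by_cases c4 : points < 15
  · rw [regionA_4 points (by omega) c4, find_lvl_alt, if_neg (by omega), regionB_4 points (by omega) c4]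
  by_cases c5 : points < 21
  · rw [regionA_5 points (by omega) c5, find_lvl_alt, if_neg (by omega), regionB_5 points (by omega) c5]
  by_cases c6 : points < 28
  · rw [regionA_6 points (by omega) c6, find_lvl_alt, if_neg (by omega), regionB_6 points (by omega) c6]
  by_cases c7 : points < 36
  · rw [regionA_7 points (by omega) c7, find_lvl_alt, if_neg (by omega), regionB_7 points (by omega) c7]
  by_cases c8 : points < 45
  · rw [regionA_8 points (by omega) c8, find_lvl_alt, if_neg (by omega), regionB_8 points (by omega) c8]
  rw [regionA_9 points (by omega) (by omega), find_lvl_alt, if_neg (by omega), regionB_9 points (by omega) (by omega)]
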